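-- pv_equiv track=rewrite | github.com/c-3lab/moral-keeper-ai | moral_keeper_ai/criateria.py | from_prompt
-- ===== SOURCE A (Python) =====
-- from enum import IntFlag, auto, nonmember
--
-- class Criteria(IntFlag):
--     NONE = 0
--     VIOLENT = auto()
--     INAPPROPRIATE = auto()
--     SENSITIVE = auto()
--     INACCURATE = auto()
--     DISREPUTE = auto()
--     ALL = VIOLENT | INAPPROPRIATE | SENSITIVE | INACCURATE | DISREPUTE
--     OTHERS = auto()
--     OPENAI_FILTER = auto()
--
--     MAPPINGS = nonmember(
--         {
--             VIOLENT: [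
--                 "No personal attacks",
--                 "No discrimination",
--                 "No threats or violence",
--                 "No privacy violations",
--             ],
--             INAPPROPRIATE: [
--                 "No obscene language",
--                 "No sexual content",
--                 "Child-friendly",
--                 "No harassment",
--             ],
--             SENSITIVE: [
--                 "No political promotion",
--                 "No religious solicitation",
--             ],
--             INACCURATE: [
--                 "Accurate info",
--                 "No rumors",
--                 "Correct health info",
--             ],
--             DISREPUTE: [
--                 "Protection of brand image",
--                 "No defamation or unwarranted criticism",
--                 "Legal compliance and regulations",
--                 "Adherence to company policies",
--             ],
--         }
--     )
--
--     def to_prompts(self) -> list: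
--         prompts = []
--         for k, v in Criteria.MAPPINGS.items():
--             if self & k:
--                 prompts.extend(v)
--
--         return prompts
--
--     @staticmethod
--     def to_str(criteria) -> str:
--         criteria_to_str = {
--             Criteria.VIOLENT: 'violent',
--             Criteria.INAPPROPRIATE: 'inappropriate',
--             Criteria.SENSITIVE: 'sensitive',
--             Criteria.INACCURATE: 'inaccurate',
--             Criteria.DISREPUTE: 'disrepute',
--             Criteria.OTHERS: 'others',
--         }
--         return criteria_to_str[criteria]
--
--     @staticmethod
--     def from_prompt(prompt):
--         criteria = 0
--         for k, v in Criteria.MAPPINGS.items():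
--             if prompt in v:
--                 criteria |= k
--
--         if criteria:
--             return Criteria(criteria)
--         else:
--             return Criteria.OTHERS
--
-- def from_prompt(prompt):
--     criteria = 0
--     for k, v in Criteria.MAPPINGS.items():
--         if prompt in v:
--             criteria |= k
--
--     if criteria:
--         return Criteria(criteria)
--     else:
--         return Criteria.OTHERS
-- ===== SOURCE B (Python) =====
-- from enum import IntFlag, auto, nonmember
--
-- class Criteria(IntFlag):
--     NONE = 0
--     VIOLENT = auto()
--     INAPPROPRIATE = auto()
--     SENSITIVE = auto()
--     INACCURATE = auto()
--     DISREPUTE = auto()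
--     ALL = VIOLENT | INAPPROPRIATE | SENSITIVE | INACCURATE | DISREPUTE
--     OTHERS = auto()
--     OPENAI_FILTER = auto()
--
--     MAPPINGS = nonmember(
--         {
--             VIOLENT: [
--                 "No personal attacks",
--                 "No discrimination",
--                 "No threats or violence",
--                 "No privacy violations",
--             ],
--             INAPPROPRIATE: [
--                 "No obscene language",
--                 "No sexual content",
--                 "Child-friendly",
--                 "No harassment",
--             ],
--             SENSITIVE: [
--                 "No political promotion",
--                 "No religious solicitation",
--             ],
--             INACCURATE: [
--                 "Accurate info",
--                 "No rumors",
--                 "Correct health info",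
--             ],
--             DISREPUTE: [
--                 "Protection of brand image",
--                 "No defamation or unwarranted criticism",
--                 "Legal compliance and regulations",
--                 "Adherence to company policies",
--             ],
--         }
--     )
--
-- # Reverse index built once: prompt string -> its single criteria flag.
-- _INDEX = {p: k for k, v in Criteria.MAPPINGS.items() for p in v}
--
-- def from_prompt(prompt):
--     return Criteria(_INDEX.get(prompt, Criteria.OTHERS))
-- ===== Notes on version B (the rewrite author's own statement) =====
-- stated objective: idiomatic
-- what changed: B flattens MAPPINGS once into a reverse index dict (prompt -> flag) and from_prompt becomes a single hash lookup with OTHERS as default, removing the per-category loop and the repeated list scans.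
import Mathlib
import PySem

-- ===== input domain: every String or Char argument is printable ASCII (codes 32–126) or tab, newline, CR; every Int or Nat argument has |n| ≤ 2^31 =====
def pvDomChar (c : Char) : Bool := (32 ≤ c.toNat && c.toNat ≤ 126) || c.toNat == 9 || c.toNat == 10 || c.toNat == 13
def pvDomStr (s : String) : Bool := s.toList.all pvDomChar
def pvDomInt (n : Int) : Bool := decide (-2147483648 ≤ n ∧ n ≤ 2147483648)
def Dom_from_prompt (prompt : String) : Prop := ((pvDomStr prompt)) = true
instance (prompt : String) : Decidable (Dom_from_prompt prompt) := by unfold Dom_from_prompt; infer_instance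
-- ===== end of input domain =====

-- B replaces A's per-category loop (a list-membership scan per category, OR-ing flags)
-- by a reverse index dict built once, so from_prompt is a single lookup with OTHERS as default.
-- Criteria flags as ints: VIOLENT=1, INAPPROPRIATE=2, SENSITIVE=4, INACCURATE=8, DISREPUTE=16, OTHERS=32.

-- ===== PORT A =====
-- Criteria.MAPPINGS in insertion order.
def pvMappings : List (Int × List String) :=
  [ (1, ["No personal attacks", "No discrimination", "No threats or violence", "No privacy violations"])
  , (2, ["No obscene language", "No sexual content", "Child-friendly", "No harassment"])
  , (4, ["No political promotion", "No religious solicitation"])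
  , (8, ["Accurate info", "No rumors", "Correct health info"])
  , (16, ["Protection of brand image", "No defamation or unwarranted criticism", "Legal compliance and regulations", "Adherence to company policies"]) ]

def from_prompt (prompt : String) : Int :=
  let criteria : Int :=
    pvMappings.foldl (fun c kv => if prompt ∈ kv.2 then PySem.Int.bor c kv.1 else c) 0
  if criteria ≠ 0 then criteria else 32

-- ===== PORT B =====
-- _INDEX = {p: k for k, v in Criteria.MAPPINGS.items() for p in v}
def pvIndex : PySem.Dict String Int :=
  pvMappings.foldl (fun d kv => kv.2.foldl (fun d p => d.insert p kv.1) d) PySem.Dict.empty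

def from_prompt_alt (prompt : String) : Int :=
  pvIndex.getD prompt 32

-- ===== PRECONDITION & SPEC =====
def Spec_from_prompt (prompt : String) (out : Int) : Prop := out = from_prompt_alt prompt
instance (prompt : String) (out : Int) : Decidable (Spec_from_prompt prompt out) := by unfold Spec_from_prompt; infer_instance

-- ===== CLAIM (what is proved, stated in full; the proofs are below) =====
def Claim_equal_from_prompt : Prop := ∀ (prompt : String), Dom_from_prompt prompt → Spec_from_prompt prompt (from_prompt prompt)

-- ===== LEMMAS AND PROOFS =====

-- ===== VERDICT (by name: the statement is the Claim_ definition above) =====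
theorem from_prompt_spec : Claim_equal_from_prompt := by
  intro p _
  unfold Spec_from_prompt
  by_cases h1 : p = "No personal attacks"
  · subst h1; decide
  by_cases h2 : p = "No discrimination"
  · subst h2; decide
  by_cases h3 : p = "No threats or violence"
  · subst h3; decide
  by_cases h4 : p = "No privacy violations"
  · subst h4; decide
  by_cases h5 : p = "No obscene language"
  · subst h5; decide
  by_cases h6 : p = "No sexual content"
  · subst h6; decide
  by_cases h7 : p = "Child-friendly"
  · subst h7; decide
  by_cases h8 : p = "No harassment"
  · subst h8; decide
  by_cases h9 : p = "No political promotion"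
  · subst h9; decide
  by_cases h10 : p = "No religious solicitation"
  · subst h10; decide
  by_cases h11 : p = "Accurate info"
  · subst h11; decide
  by_cases h12 : p = "No rumors"
  · subst h12; decide
  by_cases h13 : p = "Correct health info"
  · subst h13; decide
  by_cases h14 : p = "Protection of brand image"
  · subst h14; decide
  by_cases h15 : p = "No defamation or unwarranted criticism"
  · subst h15; decide
  by_cases h16 : p = "Legal compliance and regulations"
  · subst h16; decide
  by_cases h17 : p = "Adherence to company policies"
  · subst h17; decide
  simp [from_prompt, from_prompt_alt, pvMappings, pvIndex, PySem.Dict.getD, PySem.Dict.get?, PySem.Dict.insert, PySem.Dict.empty, List.find?, beq_iff_eq, h1, h2, h3, h4, h5, h6, h7, h8, h9, h10, h11, h12, h13, h14, h15, h16, h17, beq_eq_false_iff_ne.mpr (Ne.symm h1), beq_eq_false_iff_ne.mpr (Ne.symm h2), beq_eq_false_iff_ne.mpr (Ne.symm h3), beq_eq_false_iff_ne.mpr (Ne.symm h4), beq_eq_false_iff_ne.mpr (Ne.symm h5), beq_eq_false_iff_ne.mpr (Ne.symm h6), beq_eq_false_iff_ne.mpr (Ne.symm h7), beq_eq_false_iff_ne.mpr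 (Ne.symm h8), beq_eq_false_iff_ne.mpr (Ne.symm h9), beq_eq_false_iff_ne.mpr (Ne.symm h10), beq_eq_false_iff_ne.mpr (Ne.symm h11), beq_eq_false_iff_ne.mpr (Ne.symm h12), beq_eq_false_iff_ne.mpr (Ne.symm h13), beq_eq_false_iff_ne.mpr (Ne.symm h14), beq_eq_false_iff_ne.mpr (Ne.symm h15), beq_eq_false_iff_ne.mpr (Ne.symm h16), beq_eq_false_iff_ne.mpr (Ne.symm h17)]
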